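-- pv_equiv track=rewrite | github.com/eddie030207/PNU_CSE_Coding | Introduction to Computers and Programming (1-1)/Assignment/16 BINGO/16. bingo.py | depend
-- ===== SOURCE A (Python) =====
-- def depend(arr):
--     lenlist = []
--     arr = ''.join(str(_) for _ in arr).split("0") #0을 기준으로 분리하고 join하기
--     for i in range(len(arr)):
--         lenlist.append(len(arr[i])) #lenlist에 arr의 각 원소의 길이만큼을 append
--     result = (max(lenlist), lenlist.count(max(lenlist)))
--     if result[0] == 0: #만약 일차원 리스트의 모든 원소가 0이라면 (0, 0) 튜플 출력
--         return (0, 0)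
--     return result
-- ===== SOURCE B (Python) =====
-- def _close(cur, maxlen, cnt):
--     # close the current run: fold it into the (maxlen, cnt) summary
--     if cur > maxlen:
--         return cur, 1
--     if cur == maxlen and cur > 0:
--         return maxlen, cnt + 1
--     return maxlen, cnt
--
--
-- def depend(arr):
--     s = ''.join(str(_) for _ in arr)
--     cur, maxlen, cnt = 0, 0, 0
--     for ch in s:
--         if ch == '0':
--             maxlen, cnt = _close(cur, maxlen, cnt)
--             cur = 0
--         else:
--             cur += 1
--     maxlen, cnt = _close(cur, maxlen, cnt)
--     return (maxlen, cnt)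
-- ===== Notes on version B (the rewrite author's own statement) =====
-- stated objective: simpler
-- what changed: Replaces split-on-'0' + length-list + max + count with a single streaming pass over the joined string maintaining (current run, best length, count), so no intermediate lists and no double max scan.
import Mathlib
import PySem

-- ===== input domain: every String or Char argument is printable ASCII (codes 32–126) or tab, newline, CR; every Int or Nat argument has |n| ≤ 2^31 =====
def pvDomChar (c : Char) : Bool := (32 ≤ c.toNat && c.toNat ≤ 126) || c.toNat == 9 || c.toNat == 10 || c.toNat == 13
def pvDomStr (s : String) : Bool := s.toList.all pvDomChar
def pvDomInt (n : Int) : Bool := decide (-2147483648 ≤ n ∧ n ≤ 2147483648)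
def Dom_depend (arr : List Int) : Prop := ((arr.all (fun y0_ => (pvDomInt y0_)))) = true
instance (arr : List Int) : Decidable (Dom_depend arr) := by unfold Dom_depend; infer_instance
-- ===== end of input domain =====

-- B replaces A's split-on-'0' / length-list / max / count pipeline by one streaming pass
-- over the joined string that maintains (current run, best length, count): simpler, no
-- intermediate lists and no repeated max scan.


-- ===== PORT A =====
def depend (arr : List Int) : Int × Int :=
  -- arr = ''.join(str(_) for _ in arr).split("0")
  let s := PySem.Chars.join [] (arr.map PySem.Int.toChars)
  let parts := PySem.Chars.splitOn s ['0']
  -- for i in range(len(arr)): lenlist.append(len(arr[i]))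
  let lenlist := (PySem.List.pyRange 0 (PySem.List.len parts) 1).foldl
      (fun acc i => acc ++ [PySem.List.len (PySem.List.pyGetD parts i [])]) []
  -- result = (max(lenlist), lenlist.count(max(lenlist)))  (lenlist is never empty: split returns ≥ 1 piece, so max never raises)
  let m := (PySem.List.max? lenlist (fun x => x)).getD 0
  let result := (m, (PySem.List.count lenlist m : Int))
  if result.1 = 0 then (0, 0) else result

-- ===== PORT B =====
-- Source B's _close helper
def closeRun (cur maxlen cnt : Int) : Int × Int :=
  if cur > maxlen then (cur, 1)
  else if cur = maxlen ∧ cur > 0 then (maxlen, cnt + 1)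
  else (maxlen, cnt)

-- Source B's loop body
def stepB (st : Int × Int × Int) (ch : Char) : Int × Int × Int :=
  if ch = '0' then
    let mc := closeRun st.1 st.2.1 st.2.2
    (0, mc.1, mc.2)
  else (st.1 + 1, st.2.1, st.2.2)

def depend_alt (arr : List Int) : Int × Int :=
  let s := PySem.Chars.join [] (arr.map PySem.Int.toChars)
  let st := s.foldl stepB (0, 0, 0)
  closeRun st.1 st.2.1 st.2.2

-- ===== PRECONDITION & SPEC =====
def Spec_depend (arr : List Int) (out : Int × Int) : Prop := out = depend_alt arr
instance (arr : List Int) (out : Int × Int) : Decidable (Spec_depend arr out) := by unfold Spec_depend; infer_instance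

-- ===== CLAIM (what is proved, stated in full; the proofs are below) =====
def Claim_equal_depend : Prop := ∀ (arr : List Int), Dom_depend arr → Spec_depend arr (depend arr)

-- ===== LEMMAS AND PROOFS =====

-- the '0'-separated pieces of a character list (what Python's s.split("0") returns)
def runs : List Char → List (List Char)
  | [] => [[]]
  | c :: rest =>
    if c = '0' then [] :: runs rest
    else
      match runs rest with
      | [] => [[c]]
      | h :: t => (c :: h) :: t

theorem runs_ne_nil (l : List Char) : runs l ≠ [] := by
  cases l with
  | nil => simp [runs]
  | cons c rest =>
    simp only [runs]
    split
    · simp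
    · cases h : runs rest <;> simp

-- prepend a prefix onto the first piece
def consHd (pre : List Char) : List (List Char) → List (List Char)
  | [] => [pre]
  | h :: t => (pre ++ h) :: t

theorem splitOn_go_eq (fuel : Nat) (l cur : List Char) (acc : List (List Char))
    (h : l.length < fuel) :
    PySem.Chars.splitOn.go ['0'] fuel l cur acc = acc.reverse ++ consHd cur.reverse (runs l) := by
  induction fuel generalizing l cur acc with
  | zero => omega
  | succ fuel ih =>
    cases l with
    | nil => simp [PySem.Chars.splitOn.go, runs, consHd]
    | cons c rest =>
      by_cases hc : c = '0'
      · subst hc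
        rw [show PySem.Chars.splitOn.go ['0'] (fuel+1) ('0' :: rest) cur acc
              = PySem.Chars.splitOn.go ['0'] fuel rest [] (cur.reverse :: acc) by
            simp [PySem.Chars.splitOn.go, List.isPrefixOf]]
        rw [ih rest [] (cur.reverse :: acc) (by simpa using h)]
        simp only [runs, reduceIte, List.reverse_cons, List.reverse_nil, List.append_assoc]
        cases hr : runs rest with
        | nil => exact absurd hr (runs_ne_nil rest)
        | cons hh tt => simp [consHd]
      · rw [show PySem.Chars.splitOn.go ['0'] (fuel+1) (c :: rest) cur acc
              = PySem.Chars.splitOn.go ['0'] fuel rest (c :: cur) acc by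
            simp only [PySem.Chars.splitOn.go, List.isPrefixOf]
            exact if_neg (by simp [Ne.symm hc])]
        rw [ih rest (c :: cur) acc (by simpa using h)]
        simp only [runs, if_neg hc]
        cases hr : runs rest with
        | nil => exact absurd hr (runs_ne_nil rest)
        | cons hh tt => simp [consHd]

theorem splitOn_eq_runs (s : List Char) : PySem.Chars.splitOn s ['0'] = runs s := by
  rw [PySem.Chars.splitOn, splitOn_go_eq (s.length + 1) s [] [] (by omega)]
  cases hr : runs s with
  | nil => exact absurd hr (runs_ne_nil s)
  | cons h t => simp [consHd]

-- closing-fold over piece lengths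
def step1 (mc : Int × Int) (x : Int) : Int × Int := closeRun x mc.1 mc.2

-- add to the first element
def addHd (a : Int) : List Int → List Int
  | [] => [a]
  | x :: t => (a + x) :: t

theorem fold_runs (l : List Char) : ∀ (cur m c : Int),
    closeRun (l.foldl stepB (cur, m, c)).1 (l.foldl stepB (cur, m, c)).2.1
        (l.foldl stepB (cur, m, c)).2.2
      = List.foldl step1 (m, c) (addHd cur ((runs l).map (fun p => (p.length : Int)))) := by
  induction l with
  | nil => intro cur m c; simp [runs, addHd, step1]
  | cons ch rest ih =>
    intro cur m c
    by_cases hc : ch = '0'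
    · subst hc
      simp only [List.foldl_cons, stepB, reduceIte]
      rw [ih 0 (closeRun cur m c).1 (closeRun cur m c).2]
      simp only [runs, reduceIte, List.map_cons, List.length_nil, Nat.cast_zero, addHd, add_zero]
      cases hr : (runs rest).map (fun p => ((p.length : Int))) with
      | nil => exact absurd (List.map_eq_nil_iff.mp hr) (runs_ne_nil rest)
      | cons x t => simp [step1, List.foldl_cons]
    · simp only [List.foldl_cons, stepB, if_neg hc]
      rw [ih (cur + 1) m c]
      simp only [runs, if_neg hc]
      cases hr : runs rest with
      | nil => exact absurd hr (runs_ne_nil rest)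
      | cons h t =>
        simp only [List.map_cons, addHd, List.length_cons]
        congr 2
        push_cast
        ring

-- the arithmetic core: folding the close step over a list of nonnegative run lengths
-- computes (running max, count of the max among the positives)
theorem fold_step1_eq (ls : List Int) : ∀ (m c : Int), 0 ≤ m → (∀ x ∈ ls, 0 ≤ x) →
    List.foldl step1 (m, c) ls
      = (ls.foldl max m,
         (if ls.foldl max m = m then c else 0)
           + (if 0 < ls.foldl max m then (ls.count (ls.foldl max m) : Int) else 0)) := by
  induction ls with
  | nil => intro m c hm _; simp
  | cons x t ih =>
    intro m c hm hx
    have hx0 : 0 ≤ x := hx x (by simp)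
    have hxt : ∀ y ∈ t, 0 ≤ y := fun y hy => hx y (by simp [hy])
    simp only [List.foldl_cons]
    by_cases h1 : x > m
    · rw [show step1 (m, c) x = (x, 1) by simp [step1, closeRun, h1]]
      rw [ih x 1 hx0 hxt]
      have hmx : max m x = x := max_eq_right h1.le
      simp only [hmx]
      have hF := (PySem.List.le_foldl_max t x).1
      refine Prod.ext rfl ?_
      simp only [List.count_cons, beq_iff_eq]
      push_cast
      split_ifs <;> omega
    · by_cases h2 : x = m ∧ x > 0
      · obtain ⟨rfl, hp⟩ := h2
        rw [show step1 (x, c) x = (x, c + 1) by simp [step1, closeRun, hp]]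
        rw [ih x (c + 1) hx0 hxt]
        simp only [max_self]
        have hF := (PySem.List.le_foldl_max t x).1
        refine Prod.ext rfl ?_
        simp only [List.count_cons, beq_iff_eq]
        push_cast
        split_ifs <;> omega
      · rw [show step1 (m, c) x = (m, c) by simp [step1, closeRun, h1, h2]]
        rw [ih m c hm hxt]
        have hmx : max m x = m := max_eq_left (by omega)
        simp only [hmx]
        have hF := (PySem.List.le_foldl_max t m).1
        refine Prod.ext rfl ?_
        simp only [List.count_cons, beq_iff_eq]
        push_cast
        split_ifs <;> omega

theorem lenlist_eq (parts : List (List Char)) :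
    (PySem.List.pyRange 0 (PySem.List.len parts) 1).foldl
        (fun acc i => acc ++ [PySem.List.len (PySem.List.pyGetD parts i [])]) []
      = parts.map (fun p => ((p.length : Int))) := by
  rw [PySem.List.foldl_append_singleton_eq_map]
  rw [show (fun i => PySem.List.len (PySem.List.pyGetD parts i []))
        = (PySem.List.len ∘ fun i => PySem.List.pyGetD parts i []) from rfl]
  rw [← List.map_map, PySem.List.map_pyGetD_pyRange_zero]
  simp [PySem.List.len_eq]

-- ===== VERDICT (by name: the statement is the Claim_ definition above) =====
theorem depend_spec : Claim_equal_depend := by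
  unfold Claim_equal_depend
  intro arr _
  unfold Spec_depend depend depend_alt
  simp only []
  rw [splitOn_eq_runs, lenlist_eq, fold_runs]
  set s := PySem.Chars.join [] (arr.map PySem.Int.toChars) with hs
  cases hr : (runs s).map (fun p => ((p.length : Int))) with
  | nil => exact absurd (List.map_eq_nil_iff.mp hr) (runs_ne_nil s)
  | cons x t =>
    have hx0 : 0 ≤ x := by
      have : x ∈ (runs s).map (fun p => ((p.length : Int))) := by rw [hr]; simp
      obtain ⟨p, _, hp⟩ := List.mem_map.mp this
      omega
    have hxt : ∀ y ∈ t, 0 ≤ y := by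
      intro y hy
      have : y ∈ (runs s).map (fun p => ((p.length : Int))) := by rw [hr]; simp [hy]
      obtain ⟨p, _, hp⟩ := List.mem_map.mp this
      omega
    have hls : ∀ y ∈ x :: t, 0 ≤ y := by
      intro y hy
      rcases List.mem_cons.mp hy with rfl | h
      · exact hx0
      · exact hxt y h
    rw [show addHd 0 (x :: t) = x :: t by simp [addHd]]
    rw [fold_step1_eq (x :: t) 0 0 le_rfl hls]
    rw [PySem.List.max?_id_cons, PySem.List.count_eq]
    simp only [Option.getD_some, List.foldl_cons, max_eq_right hx0]
    have hF := (PySem.List.le_foldl_max t x).1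
    by_cases hz : t.foldl max x = 0
    · simp [hz]
    · have hpos : 0 < t.foldl max x := by omega
      simp [hz, hpos]
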